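-- pv_equiv track=rewrite | github.com/scikit-learn/scikit-learn | venv/lib/python3.5/site-packages/dask/utils.py | extra_titles
-- ===== SOURCE A (Python) =====
-- def extra_titles(doc):
--     lines = doc.split('\n')
--     titles = {i: lines[i].strip() for i in range(len(lines) - 1)
--               if lines[i + 1] and all(c == '-' for c in lines[i + 1].strip())}
--
--     seen = set()
--     for i, title in sorted(titles.items()):
--         if title in seen:
--             new_title = 'Extra ' + title
--             lines[i] = lines[i].replace(title, new_title)
--             lines[i + 1] = lines[i + 1].replace('-' * len(title),
--                                                 '-' * len(new_title))
--         else: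
--             seen.add(title)
--
--     return '\n'.join(lines)
-- ===== SOURCE B (Python) =====
-- def extra_titles(doc):
--     lines = doc.split('\n')
--     seen = set()
--     out = []
--     carry = None
--     for line, nxt in zip(lines, lines[1:] + [None]):
--         cur = line if carry is None else line.replace(*carry)
--         carry = None
--         if nxt and all(c == '-' for c in nxt.strip()):
--             title = line.strip()
--             if title in seen:
--                 new_title = 'Extra ' + title
--                 cur = cur.replace(title, new_title)
--                 carry = ('-' * len(title), '-' * len(new_title))
--             else:
--                 seen.add(title)
--         out.append(cur)
--     return '\n'.join(out)
-- ===== Notes on version B (the rewrite author's own statement) =====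
-- stated objective: simpler
-- what changed: Replaces A's title-table dict + sorted(items) + in-place mutation of the lines array by a single pass over zipped (line, next-line) pairs that emits a fresh output list, carrying the pending dash-underline replacement to the next step instead of writing back into the list.
import Mathlib
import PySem

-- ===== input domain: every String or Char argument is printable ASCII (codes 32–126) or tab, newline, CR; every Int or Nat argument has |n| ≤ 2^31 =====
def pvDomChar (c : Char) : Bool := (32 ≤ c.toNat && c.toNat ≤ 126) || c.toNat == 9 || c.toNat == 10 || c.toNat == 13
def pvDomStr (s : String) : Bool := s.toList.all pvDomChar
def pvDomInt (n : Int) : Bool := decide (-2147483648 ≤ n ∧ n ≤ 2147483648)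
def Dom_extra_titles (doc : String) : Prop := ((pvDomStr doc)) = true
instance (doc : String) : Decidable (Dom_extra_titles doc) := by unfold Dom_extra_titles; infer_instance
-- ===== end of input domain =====

-- B replaces A's title-table + sorted(items) + in-place mutation of the lines array by a
-- single pass over (line, next-line) pairs that EMITS a fresh output list, carrying the
-- pending dash-underline replacement to the next step (objective: simpler, no mutation).

-- ===== PORT A =====
-- '-' * n
def etDashes (n : Int) : String := String.ofList (List.replicate n.toNat '-')  -- n = a Str.len, always ≥ 0

-- s and all(c == '-' for c in s.strip())   (shared detection helper)
def etDash (s : String) : Bool :=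
  decide (s ≠ "") && (PySem.Str.strip s).toList.all (· == '-')

-- lines[i+1] and all(c == '-' for c in lines[i+1].strip())
def etIsTitleAt (lines : List String) (i : Nat) : Bool :=
  etDash (lines.getD (i + 1) "")   -- i + 1 < len lines: index from range(len(lines)-1)

-- body of A's 'for i, title in sorted(titles.items())' loop; state = (lines, seen)
def etStep (st : List String × PySem.Set String) (p : Nat × String) :
    List String × PySem.Set String :=
  if PySem.Set.contains st.2 p.2 then
    let new_title := "Extra " ++ p.2
    let l1 := st.1.set p.1 (PySem.Str.replace (st.1.getD p.1 "") p.2 new_title)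
    (l1.set (p.1 + 1)
       (PySem.Str.replace (l1.getD (p.1 + 1) "")
         (etDashes (PySem.Str.len p.2)) (etDashes (PySem.Str.len new_title))), st.2)
  else (st.1, PySem.Set.add st.2 p.2)

def extra_titles (doc : String) : String :=
  let lines := (PySem.Str.split? doc "\n").getD []
  -- titles = {i: lines[i].strip() for i in range(len(lines)-1) if …} as an assoc list in key order
  let titles : List (Nat × String) :=
    ((List.range (lines.length - 1)).filter (etIsTitleAt lines)).map
      (fun i => (i, PySem.Str.strip (lines.getD i "")))
  -- sorted(titles.items()): keys are distinct ints, so Python's tuple sort = sort by first component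
  let ts := PySem.List.sorted titles Prod.fst false
  let res := ts.foldl etStep (lines, PySem.Set.empty)
  PySem.Str.join "\n" res.1

-- ===== PORT B =====
-- body of B's 'for line, nxt in zip(lines, lines[1:] + [None])' loop;
-- state = (out, carry, seen): the emitted lines, the pending dash replacement, the seen titles
def etAltStep (st : List String × Option (String × String) × PySem.Set String)
    (p : String × Option String) :
    List String × Option (String × String) × PySem.Set String :=
  let cur := match st.2.1 with
    | none => p.1
    | some (a, b) => PySem.Str.replace p.1 a b
  match p.2 with
  | none => (st.1 ++ [cur], none, st.2.2)
  | some nxt =>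
    if etDash nxt then
      let title := PySem.Str.strip p.1
      if PySem.Set.contains st.2.2 title then
        let new_title := "Extra " ++ title
        (st.1 ++ [PySem.Str.replace cur title new_title],
         some (etDashes (PySem.Str.len title), etDashes (PySem.Str.len new_title)), st.2.2)
      else (st.1 ++ [cur], none, PySem.Set.add st.2.2 title)
    else (st.1 ++ [cur], none, st.2.2)

def extra_titles_alt (doc : String) : String :=
  let lines := (PySem.Str.split? doc "\n").getD []
  let res := (lines.zip ((lines.drop 1).map some ++ [none])).foldl etAltStep
      ([], none, PySem.Set.empty)
  PySem.Str.join "\n" res.1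

-- ===== PRECONDITION & SPEC =====
def Spec_extra_titles (doc : String) (out : String) : Prop := out = extra_titles_alt doc
instance (doc : String) (out : String) : Decidable (Spec_extra_titles doc out) := by unfold Spec_extra_titles; infer_instance

-- ===== CLAIM (what is proved, stated in full; the proofs are below) =====
def Claim_equal_extra_titles : Prop := ∀ (doc : String), Dom_extra_titles doc → Spec_extra_titles doc (extra_titles doc)

-- ===== LEMMAS AND PROOFS =====

-- A's guarded step indexed over the original lines
def etAStep (orig : List String) (st : List String × PySem.Set String) (i : Nat) :
    List String × PySem.Set String :=
  if etIsTitleAt orig i then etStep st (i, PySem.Str.strip (orig.getD i "")) else st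

-- B's step fed with the pair the zip produces at index i
def etBStep (orig : List String)
    (st : List String × Option (String × String) × PySem.Set String) (i : Nat) :
    List String × Option (String × String) × PySem.Set String :=
  etAltStep st (orig.getD i "",
    if i + 1 < orig.length then some (orig.getD (i + 1) "") else none)

def etApplyCarry (c : Option (String × String)) (s : String) : String :=
  match c with
  | none => s
  | some (a, b) => PySem.Str.replace s a b

-- fold over 'filter then map' = fold over the source list with a guard
theorem foldl_filter_map {α β γ : Type} (l : List α) (p : α → Bool) (h : α → β)
    (f : γ → β → γ) (s : γ) :
    ((l.filter p).map h).foldl f s = l.foldl (fun s a => if p a then f s (h a) else s) s := by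
  induction l generalizing s with
  | nil => rfl
  | cons x xs ih =>
    by_cases hp : p x <;> simp [hp, ih]

theorem titles_pairwise_lt (lines : List String) :
    (((List.range (lines.length - 1)).filter (etIsTitleAt lines)).map
      (fun i => (i, PySem.Str.strip (lines.getD i "")))).Pairwise
      (fun a b => Prod.fst a < Prod.fst b) := by
  refine List.Pairwise.map _ (fun a b h => h) ?_
  exact (List.pairwise_lt_range).filter _

-- str.split(sep) never returns an empty list
theorem splitOn_go_length (sep : List Char) (fuel : Nat) (l cur : List Char)
    (acc : List (List Char)) :
    acc.length + 1 ≤ (PySem.Chars.splitOn.go sep fuel l cur acc).length := by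
  induction fuel generalizing l cur acc with
  | zero => simp [PySem.Chars.splitOn.go]
  | succ n ih =>
    cases l with
    | nil => simp [PySem.Chars.splitOn.go]
    | cons c rest =>
      rw [PySem.Chars.splitOn.go]
      split_ifs with h
      · have := ih (List.drop sep.length (c :: rest)) [] (cur.reverse :: acc)
        simp at this ⊢; omega
      · exact ih rest (c :: cur) acc

theorem lines_ne_nil (doc : String) :
    1 ≤ ((PySem.Str.split? doc "\n").getD []).length := by
  have h := splitOn_go_length ['\n'] (doc.toList.length + 1) doc.toList [] []
  simp [PySem.Str.split?, PySem.Chars.split?, PySem.Chars.splitOn]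
  simpa using h

-- indexing / set on a list split as out ++ x :: rest at index = out.length
theorem getD_append_len {α : Type} (o : List α) (x : α) (r : List α) (d : α) :
    (o ++ x :: r).getD o.length d = x := by
  induction o with
  | nil => rfl
  | cons a t ih => simpa using ih

theorem set_append_len {α : Type} (o : List α) (x y : α) (r : List α) :
    (o ++ x :: r).set o.length y = o ++ y :: r := by
  induction o with
  | nil => rfl
  | cons a t ih => simpa using ih

theorem getD_append_len_succ {α : Type} (o : List α) (x y : α) (r : List α) (d : α) :
    (o ++ x :: y :: r).getD (o.length + 1) d = y := by
  induction o with
  | nil => rfl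
  | cons a t ih => simpa using ih

theorem set_append_len_succ {α : Type} (o : List α) (x y z : α) (r : List α) :
    (o ++ x :: y :: r).set (o.length + 1) z = o ++ x :: z :: r := by
  induction o with
  | nil => rfl
  | cons a t ih => simpa using ih

theorem drop_eq_getD_cons {α : Type} (l : List α) (k : Nat) (hk : k < l.length) (d : α) :
    l.drop k = l.getD k d :: l.drop (k + 1) := by
  induction l generalizing k with
  | nil => simp at hk
  | cons a t ih =>
    cases k with
    | zero => rfl
    | succ m => simpa using ih m (by simpa using hk)

-- the zipped pair list of B is the original-lines pair at each index
theorem zip_eq_range_map (l : List String) :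
    l.zip ((l.drop 1).map some ++ [none]) =
      (List.range l.length).map (fun i =>
        (l.getD i "", if i + 1 < l.length then some (l.getD (i + 1) "") else none)) := by
  induction l with
  | nil => rfl
  | cons x xs ih =>
    cases xs with
    | nil => rfl
    | cons z zs =>
      have hzip : (x :: z :: zs).zip ((List.drop 1 (x :: z :: zs)).map some ++ [none]) =
          (x, some z) :: ((z :: zs).zip ((List.drop 1 (z :: zs)).map some ++ [none])) := rfl
      rw [hzip, ih]
      rw [show (x :: z :: zs).length = (z :: zs).length + 1 from rfl,
        List.range_succ_eq_map, List.map_cons, List.map_map]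
      refine List.cons_eq_cons.mpr ⟨?_, ?_⟩
      · have h0 : 0 + 1 < (z :: zs).length + 1 := by
          simp only [List.length_cons]; omega
        simp [List.getD]
      · symm
        apply List.map_congr_left
        intro i _
        have h2 : (i + 1) + 1 < (z :: zs).length + 1 ↔ i + 1 < (z :: zs).length := by
          simp only [List.length_cons]; omega
        simp [Function.comp, List.getD]

-- every branch of B's loop body emits exactly one line
theorem etAltStep_length (st : List String × Option (String × String) × PySem.Set String)
    (p : String × Option String) : (etAltStep st p).1.length = st.1.length + 1 := by
  obtain ⟨a, b⟩ := p
  cases b with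
  | none => simp [etAltStep]
  | some nxt => simp [etAltStep]; split_ifs <;> simp

-- ONE STEP of the invariant: A's guarded mutation at index m versus B's emit-with-carry
theorem et_step_lemma (orig : List String) (o : List String)
    (c : Option (String × String)) (s : PySem.Set String)
    (hm1 : o.length + 1 < orig.length) :
    etAStep orig
        (o ++ etApplyCarry c (orig.getD o.length "") :: orig.drop (o.length + 1), s)
        o.length =
      ((etBStep orig (o, c, s) o.length).1 ++
        etApplyCarry (etBStep orig (o, c, s) o.length).2.1
          (orig.getD (o.length + 1) "") :: orig.drop (o.length + 2),
       (etBStep orig (o, c, s) o.length).2.2) ∧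
    (etBStep orig (o, c, s) o.length).1.length = o.length + 1 := by
  have hdrop := drop_eq_getD_cons orig (o.length + 1) hm1 ""
  have hB : etBStep orig (o, c, s) o.length =
      etAltStep (o, c, s) (orig.getD o.length "", some (orig.getD (o.length + 1) "")) := by
    simp [etBStep, hm1]
  rw [hB, hdrop]
  have hcur : (match (o, c, s).2.1 with
      | none => orig.getD o.length ""
      | some (a, b) => PySem.Str.replace (orig.getD o.length "") a b) =
      etApplyCarry c (orig.getD o.length "") := by
    cases c with
    | none => rfl
    | some p => obtain ⟨a2, b2⟩ := p; rfl
  by_cases hT : etDash (orig.getD (o.length + 1) "")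
  · by_cases hS : PySem.Set.contains s (PySem.Str.strip (orig.getD o.length ""))
    · -- duplicate title: A rewrites lines m and m+1, B emits the rewrite and carries the dashes
      constructor
      · simp only [etAStep, etIsTitleAt, hT, if_true, etStep, hS, if_true,
          getD_append_len, set_append_len, getD_append_len_succ, set_append_len_succ,
          etAltStep, hcur]
        simp [etApplyCarry]
      · simp [etAltStep_length]
    · -- first occurrence: A only records, B emits unchanged with no carry
      constructor
      · simp only [etAStep, etIsTitleAt, hT, if_true, etStep, hS,
          etAltStep, hcur]
        simp [etApplyCarry]
      · simp [etAltStep_length]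
  · -- not a title position
    constructor
    · simp only [etAStep, etIsTitleAt, hT, etAltStep, hcur]
      simp [etApplyCarry]
    · simp [etAltStep_length]

-- MAIN INVARIANT: after processing indices < k, A's mutated lines are B's emitted
-- prefix, then the carry applied to line k, then the untouched original tail; seen agrees.
theorem et_invariant (orig : List String) (k : Nat) (hk : k < orig.length) :
    (List.range k).foldl (etAStep orig) (orig, PySem.Set.empty) =
      (((List.range k).foldl (etBStep orig) ([], none, PySem.Set.empty)).1 ++
        etApplyCarry ((List.range k).foldl (etBStep orig) ([], none, PySem.Set.empty)).2.1
          (orig.getD k "") :: orig.drop (k + 1),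
       ((List.range k).foldl (etBStep orig) ([], none, PySem.Set.empty)).2.2) ∧
    ((List.range k).foldl (etBStep orig) ([], none, PySem.Set.empty)).1.length = k := by
  induction k with
  | zero =>
    have h0 := drop_eq_getD_cons orig 0 hk ""
    rw [List.drop_zero] at h0
    refine ⟨?_, rfl⟩
    simp only [List.range_zero, List.foldl_nil, List.nil_append, etApplyCarry]
    rw [← h0]
  | succ m ih =>
    obtain ⟨ihA, ihL⟩ := ih (Nat.lt_of_succ_lt hk)
    rw [List.range_succ, List.foldl_append, List.foldl_append]
    simp only [List.foldl_cons, List.foldl_nil]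
    rw [ihA]
    generalize hbe : (List.range m).foldl (etBStep orig) ([], none, PySem.Set.empty) = b
      at ihL ⊢
    obtain ⟨o, c, s⟩ := b
    simp only at ihL
    subst ihL
    exact et_step_lemma orig o c s hk

-- ===== VERDICT (by name: the statement is the Claim_ definition above) =====
theorem extra_titles_spec : Claim_equal_extra_titles := by
  intro doc _
  unfold Spec_extra_titles extra_titles extra_titles_alt
  set lines := (PySem.Str.split? doc "\n").getD [] with hl
  have hn : 1 ≤ lines.length := lines_ne_nil doc
  -- A side: the sorted title table fold is the guarded fold over range (n-1)
  have hsort :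
      PySem.List.sorted
        (((List.range (lines.length - 1)).filter (etIsTitleAt lines)).map
          (fun i => (i, PySem.Str.strip (lines.getD i "")))) Prod.fst false =
      ((List.range (lines.length - 1)).filter (etIsTitleAt lines)).map
        (fun i => (i, PySem.Str.strip (lines.getD i ""))) :=
    PySem.List.sorted_eq_of_perm_of_pairwise_lt _ _ Prod.fst (List.Perm.refl _)
      (titles_pairwise_lt _)
  simp only [hsort, foldl_filter_map]
  -- B side: the zip fold is the indexed fold over range n
  rw [zip_eq_range_map, List.foldl_map]
  have hfoldA :
      (List.range (lines.length - 1)).foldl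
        (fun s a => if etIsTitleAt lines a then etStep s (a, PySem.Str.strip (lines.getD a "")) else s)
        (lines, PySem.Set.empty) =
      (List.range (lines.length - 1)).foldl (etAStep lines) (lines, PySem.Set.empty) := rfl
  have hfoldB :
      (List.range lines.length).foldl
        (fun st i => etAltStep st (lines.getD i "",
          if i + 1 < lines.length then some (lines.getD (i + 1) "") else none))
        ([], none, PySem.Set.empty) =
      (List.range lines.length).foldl (etBStep lines) ([], none, PySem.Set.empty) := rfl
  rw [hfoldA, hfoldB]
  -- stitch: run the invariant at k = n, then B's last step only flushes the carry
  obtain ⟨n, hn'⟩ : ∃ n, lines.length = n + 1 := ⟨lines.length - 1, by omega⟩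
  rw [hn']
  simp only [Nat.add_sub_cancel]
  obtain ⟨hA, hL⟩ := et_invariant lines n (by omega)
  rw [List.range_succ, List.foldl_append]
  simp only [List.foldl_cons, List.foldl_nil]
  rw [hA]
  generalize hbe : (List.range n).foldl (etBStep lines) ([], none, PySem.Set.empty) = b
    at hL ⊢
  obtain ⟨o, c, s⟩ := b
  simp only at hL
  have hno : ¬ (n + 1 < lines.length) := by omega
  have hlast : etBStep lines (o, c, s) n =
      (o ++ [etApplyCarry c (lines.getD n "")], none, s) := by
    simp only [etBStep]
    rw [if_neg hno]
    cases c with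
    | none => rfl
    | some p => obtain ⟨a2, b2⟩ := p; rfl
  rw [hlast]
  have hdropnil : lines.drop (n + 1) = [] := by
    apply List.drop_eq_nil_of_le; omega
  rw [hdropnil]
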